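-- pv_equiv track=rewrite | github.com/RadiAbdelaziz/Salon-website-django-and-React | backend/salon_backend/ultimate_static_fix.py | _is_static_file_request
-- ===== SOURCE A (Python) =====
-- def _is_static_file_request(path):
--     """Check if this is a static file request"""
--     # Check for static file extensions
--     static_extensions = ('.css', '.js', '.png', '.jpg', '.jpeg', '.svg', '.ico',
--                        '.woff', '.woff2', '.ttf', '.webp', '.gif', '.pdf')
--
--     if any(path.endswith(ext) for ext in static_extensions):
--         return True
--
--     # Check for admin static file patterns
--     if path.startswith('/admin/') and any(path.endswith(ext) for ext in static_extensions):
--         return True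
--
--     return False
-- ===== SOURCE B (Python) =====
-- _STATIC_EXTENSIONS = frozenset({'.css', '.js', '.png', '.jpg', '.jpeg', '.svg', '.ico',
--                                 '.woff', '.woff2', '.ttf', '.webp', '.gif', '.pdf'})
--
--
-- def _is_static_file_request(path):
--     """Check if this is a static file request"""
--     if '.' not in path:
--         return False
--     # extension = everything after the last dot; one set lookup decides.
--     return '.' + path.rsplit('.', 1)[-1] in _STATIC_EXTENSIONS
-- ===== Notes on version B (the rewrite author's own statement) =====
-- stated objective: idiomatic
-- what changed: Instead of scanning all 13 extensions with endswith (twice, the second scan behind a dead startswith branch), B extracts the extension once with rsplit and does a single frozenset membership test, dropping the redundant admin branch.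
import Mathlib
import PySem

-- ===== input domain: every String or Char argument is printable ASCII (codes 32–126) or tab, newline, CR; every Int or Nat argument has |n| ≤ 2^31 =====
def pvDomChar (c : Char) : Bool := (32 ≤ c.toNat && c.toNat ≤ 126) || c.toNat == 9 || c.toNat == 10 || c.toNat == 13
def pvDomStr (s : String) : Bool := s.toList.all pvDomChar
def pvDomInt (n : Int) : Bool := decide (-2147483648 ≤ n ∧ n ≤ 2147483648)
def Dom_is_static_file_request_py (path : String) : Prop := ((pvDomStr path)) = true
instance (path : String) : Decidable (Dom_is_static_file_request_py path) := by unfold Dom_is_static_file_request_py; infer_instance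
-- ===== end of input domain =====

-- B replaces A's double endswith scan over 13 extensions (one behind a redundant /admin/ branch)
-- by extracting the after-last-dot extension once and doing a single set membership test (idiomatic).

-- ===== PORT A =====
def pvExtsA : List String :=
  [".css", ".js", ".png", ".jpg", ".jpeg", ".svg", ".ico",
   ".woff", ".woff2", ".ttf", ".webp", ".gif", ".pdf"]

def is_static_file_request_py (path : String) : Bool :=
  if pvExtsA.any (fun ext => PySem.Str.endswith path ext) then true
  else if PySem.Str.startswith path "/admin/"
          && pvExtsA.any (fun ext => PySem.Str.endswith path ext) then true
  else false

-- ===== PORT B =====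
-- the frozenset of extensions, as char lists
def pvExtsB : List (List Char) :=
  [['.','c','s','s'], ['.','j','s'], ['.','p','n','g'], ['.','j','p','g'],
   ['.','j','p','e','g'], ['.','s','v','g'], ['.','i','c','o'], ['.','w','o','f','f'],
   ['.','w','o','f','f','2'], ['.','t','t','f'], ['.','w','e','b','p'],
   ['.','g','i','f'], ['.','p','d','f']]

-- hand port of path.rsplit('.', 1)[-1]: the characters after the LAST '.';
-- exact whenever '.' occurs in the string (B only uses it under that guard)
def pvLastSuffix : List Char → Option (List Char)
  | [] => none
  | c :: cs =>
    match pvLastSuffix cs with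
    | some r => some r
    | none => if c = '.' then some cs else none

def is_static_file_request_py_alt (path : String) : Bool :=
  if PySem.Str.isIn "." path = false then false
  else pvExtsB.contains ('.' :: ((pvLastSuffix path.toList).getD []))

-- ===== PRECONDITION & SPEC =====
def Spec_is_static_file_request_py (path : String) (out : Bool) : Prop := out = is_static_file_request_py_alt path
instance (path : String) (out : Bool) : Decidable (Spec_is_static_file_request_py path out) := by unfold Spec_is_static_file_request_py; infer_instance

-- ===== CLAIM (what is proved, stated in full; the proofs are below) =====
def Claim_equal_is_static_file_request_py : Prop := ∀ (path : String), Dom_is_static_file_request_py path → Spec_is_static_file_request_py path (is_static_file_request_py path)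

-- ===== LEMMAS AND PROOFS =====

lemma pvLastSuffix_eq_none_iff (cs : List Char) : pvLastSuffix cs = none ↔ '.' ∉ cs := by
  induction cs with
  | nil => simp [pvLastSuffix]
  | cons c cs ih =>
    simp only [pvLastSuffix]
    cases h : pvLastSuffix cs with
    | some r =>
      have hmem : '.' ∈ cs := by
        by_contra hn
        rw [ih.mpr hn] at h
        cases h
      simp [hmem]
    | none =>
      have hcs : '.' ∉ cs := ih.mp h
      by_cases hc : c = '.'
      · simp [hc]
      · simp only [if_neg hc]
        simp [hcs, Ne.symm hc]

lemma pvLastSuffix_suffix {cs r : List Char} (h : pvLastSuffix cs = some r) :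
    ('.' :: r) <:+ cs := by
  induction cs with
  | nil => simp [pvLastSuffix] at h
  | cons c cs ih =>
    simp only [pvLastSuffix] at h
    cases h' : pvLastSuffix cs with
    | some r' =>
      rw [h'] at h
      cases h
      exact (ih h').trans (List.suffix_cons c cs)
    | none =>
      rw [h'] at h
      by_cases hc : c = '.'
      · simp only [hc] at h
        cases h
        exact hc ▸ List.suffix_refl _
      · simp [hc] at h

lemma pvLastSuffix_of_suffix {w cs : List Char} (hw : '.' ∉ w)
    (h : ('.' :: w) <:+ cs) : pvLastSuffix cs = some w := by
  induction cs with
  | nil => simpa using h.length_le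
  | cons c cs ih =>
    obtain ⟨t, ht⟩ := h
    cases t with
    | nil =>
      simp only [List.nil_append, List.cons.injEq] at ht
      obtain ⟨hc, hcs⟩ := ht
      subst hcs
      have hnone : pvLastSuffix w = none := (pvLastSuffix_eq_none_iff w).mpr hw
      simp [pvLastSuffix, hnone, hc.symm]
    | cons a t' =>
      simp only [List.cons_append, List.cons.injEq] at ht
      have := ih ⟨t', ht.2⟩
      simp [pvLastSuffix, this]

lemma pv_singleton_infix_iff {a : Char} {l : List Char} : [a] <:+: l ↔ a ∈ l := by
  constructor
  · intro ⟨s, t, hst⟩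
    subst hst; simp
  · intro hm
    obtain ⟨s, t, hst⟩ := List.append_of_mem hm
    exact ⟨s, t, by simp [hst]⟩

lemma pv_isIn_dot (path : String) : PySem.Str.isIn "." path = true ↔ '.' ∈ path.toList := by
  have h : PySem.Str.isIn "." path = PySem.Chars.isIn ['.'] path.toList := by
    simp only [PySem.Str.isIn_eq]; rfl
  rw [h, PySem.Chars.isIn_iff_infix, pv_singleton_infix_iff]

-- the two extension collections hold the same 13 extensions, each '.'-headed and dot-free after the dot
lemma pvExts_facts :
    (∀ e ∈ pvExtsA, e.toList.head? = some '.' ∧ '.' ∉ e.toList.tail ∧ e.toList ∈ pvExtsB) ∧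
    (∀ b ∈ pvExtsB, pvExtsA.any (fun e => e.toList == b) = true) := by
  constructor <;> decide

lemma pv_any_iff (path : String) :
    (pvExtsA.any (fun ext => PySem.Str.endswith path ext) = true) ↔
    (is_static_file_request_py_alt path = true) := by
  unfold is_static_file_request_py_alt
  constructor
  · intro h
    obtain ⟨e, he, hend⟩ := List.any_eq_true.mp h
    obtain ⟨hhead, htail, hmem⟩ := pvExts_facts.1 e he
    have hsuf : e.toList <:+ path.toList := by
      simp only [PySem.Str.endswith_eq] at hend
      exact (PySem.Chars.endswith_iff _ _).mp hend
    cases hlist : e.toList with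
    | nil => rw [hlist] at hhead; cases hhead
    | cons a t =>
      rw [hlist] at hhead htail hmem hsuf
      simp only [List.head?_cons, Option.some.injEq] at hhead
      subst hhead
      simp only [List.tail_cons] at htail
      have hls : pvLastSuffix path.toList = some t := pvLastSuffix_of_suffix htail hsuf
      have hdot : '.' ∈ path.toList := hsuf.subset (by simp)
      have hin : PySem.Str.isIn "." path = true := (pv_isIn_dot path).mpr hdot
      rw [if_neg (by simp only [hin]; simp)]
      rw [hls]
      simpa using hmem
  · intro h
    by_cases hin : PySem.Str.isIn "." path = true
    · rw [if_neg (by simp only [hin]; simp)] at h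
      have hdot : '.' ∈ path.toList := (pv_isIn_dot path).mp hin
      obtain ⟨r, hr⟩ : ∃ r, pvLastSuffix path.toList = some r := by
        cases h' : pvLastSuffix path.toList with
        | none => exact absurd ((pvLastSuffix_eq_none_iff _).mp h') (by simpa using hdot)
        | some r => exact ⟨r, rfl⟩
      rw [hr] at h
      simp only [Option.getD_some] at h
      have hmem : ('.' :: r) ∈ pvExtsB := by simpa using h
      obtain ⟨e, he, heq⟩ := List.any_eq_true.mp (pvExts_facts.2 _ hmem)
      refine List.any_eq_true.mpr ⟨e, he, ?_⟩
      simp only [PySem.Str.endswith_eq]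
      rw [PySem.Chars.endswith_iff, (by simpa using heq : e.toList = '.' :: r)]
      exact pvLastSuffix_suffix hr
    · have hin' : PySem.Str.isIn "." path = false := by
        cases hv : PySem.Str.isIn "." path
        · rfl
        · exact absurd hv hin
      rw [if_pos hin'] at h
      cases h

lemma pvA_eq_any (path : String) :
    is_static_file_request_py path = pvExtsA.any (fun ext => PySem.Str.endswith path ext) := by
  unfold is_static_file_request_py
  cases h : pvExtsA.any (fun ext => PySem.Str.endswith path ext)
  · simp [h]
  · simp

-- ===== VERDICT (by name: the statement is the Claim_ definition above) =====
theorem is_static_file_request_py_spec : Claim_equal_is_static_file_request_py := by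
  intro path _
  unfold Spec_is_static_file_request_py
  rw [pvA_eq_any]
  exact Bool.eq_iff_iff.mpr (pv_any_iff path)
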